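-- pv_equiv track=rewrite | github.com/fractalego/wafl | wafl/connectors/utils.py | select_best_answer
-- ===== SOURCE A (Python) =====
-- def select_best_answer(answers, important_strings):
--     special_words = (
--         important_strings
--         + ["</remember>", "</execute>", "result ="]
--         + ["<execute>", "<remember>", "<execute>", "<remember>"]
--     )
--     return sorted(
--         answers, key=lambda x: sum([x.count(word) for word in special_words])
--     )[-1]
-- ===== SOURCE B (Python) =====
-- def select_best_answer(answers, important_strings):
--     special_words = (
--         important_strings
--         + ["</remember>", "</execute>", "result ="]
--         + ["<execute>", "<remember>", "<execute>", "<remember>"]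
--     )
--     best = None
--     best_score = None
--     for x in answers:
--         score = sum(x.count(w) for w in special_words)
--         if best is None or score >= best_score:
--             best, best_score = x, score
--     if best is None:
--         raise IndexError("list index out of range")
--     return best
-- ===== Notes on version B (the rewrite author's own statement) =====
-- stated objective: simpler
-- what changed: Replaces sort-by-score-then-take-last with a single linear pass keeping a running best (>= on ties so the last maximal element wins, matching stable sort).
import Mathlib
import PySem

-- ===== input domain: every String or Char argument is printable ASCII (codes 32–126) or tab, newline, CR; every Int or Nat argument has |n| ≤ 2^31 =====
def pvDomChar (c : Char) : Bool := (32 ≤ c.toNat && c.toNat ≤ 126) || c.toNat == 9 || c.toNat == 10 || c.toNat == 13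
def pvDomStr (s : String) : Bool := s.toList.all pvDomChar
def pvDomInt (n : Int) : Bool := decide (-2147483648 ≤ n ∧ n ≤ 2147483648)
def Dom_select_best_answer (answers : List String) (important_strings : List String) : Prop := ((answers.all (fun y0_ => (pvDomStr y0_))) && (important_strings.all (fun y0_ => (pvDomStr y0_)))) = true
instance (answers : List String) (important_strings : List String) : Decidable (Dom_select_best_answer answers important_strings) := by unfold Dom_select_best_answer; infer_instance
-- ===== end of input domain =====

-- B replaces sort-by-score-then-take-last with one linear pass keeping a running best (simpler).
-- Both programs raise IndexError on empty answers; Pre_ excludes exactly that.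


-- ===== PORT A =====
-- special_words = important_strings + [...] + [...]
def pvSpecialWords (important_strings : List String) : List String :=
  important_strings
    ++ ["</remember>", "</execute>", "result ="]
    ++ ["<execute>", "<remember>", "<execute>", "<remember>"]

-- lambda x: sum([x.count(word) for word in special_words])
def pvKeyA (special_words : List String) (x : String) : Int :=
  ((special_words.map (fun word => (PySem.Str.count x word : Int))).sum)

-- sorted(answers, key=…)[-1]; [-1] on the empty list raises IndexError (excluded by Pre_),
-- the port returns "" there (outside the claim).
def select_best_answer (answers : List String) (important_strings : List String) : String :=
  (PySem.List.pyGet? (PySem.List.sorted answers (pvKeyA (pvSpecialWords important_strings)) false) (-1)).getD ""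

-- ===== PORT B =====
def pvScoreB (special_words : List String) (x : String) : Int :=
  ((special_words.map (fun w => (PySem.Str.count x w : Int))).sum)

-- the loop: keep best and best_score, update when score >= best_score (last maximum wins)
def pvBestLoop (special_words : List String) (best : String) (best_score : Int) : List String → String
  | [] => best
  | x :: rest =>
    let score := pvScoreB special_words x
    if best_score ≤ score then pvBestLoop special_words x score rest
    else pvBestLoop special_words best best_score rest

-- B raises IndexError on empty answers (excluded by Pre_); the port returns "" there.
def select_best_answer_alt (answers : List String) (important_strings : List String) : String :=
  match answers with
  | [] => ""
  | x :: rest =>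
    pvBestLoop (pvSpecialWords important_strings) x
      (pvScoreB (pvSpecialWords important_strings) x) rest

-- ===== PRECONDITION & SPEC =====
-- Pre_ excludes only empty answers, where both Pythons raise IndexError (sorted([])[-1]).
def Pre_select_best_answer (answers : List String) (important_strings : List String) : Prop :=
  answers ≠ []
instance (answers : List String) (important_strings : List String) : Decidable (Pre_select_best_answer answers important_strings) := by unfold Pre_select_best_answer; infer_instance

def pvWitness_select_best_answer : List String × List String := (["a <execute>", "b"], ["b"])

def Spec_select_best_answer (answers : List String) (important_strings : List String) (out : String) : Prop := out = select_best_answer_alt answers important_strings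
instance (answers : List String) (important_strings : List String) (out : String) : Decidable (Spec_select_best_answer answers important_strings out) := by unfold Spec_select_best_answer; infer_instance

-- ===== CLAIM (what is proved, stated in full; the proofs are below) =====
def Claim_equal_select_best_answer : Prop := ∀ (answers : List String) (important_strings : List String), Dom_select_best_answer answers important_strings → Pre_select_best_answer answers important_strings → Spec_select_best_answer answers important_strings (select_best_answer answers important_strings)

-- ===== LEMMAS AND PROOFS =====

-- abbreviation for A's insertion step (the body of PySem.List.sorted's foldl)
def pvIns (key : String → Int) (acc : List String) (x : String) : List String :=
  PySem.List.insertBy (fun a b => decide (key a < key b)) x acc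

theorem pvIns_cons (key : String → Int) (x z : String) (zs : List String) :
    pvIns key (z :: zs) x =
      if key x < key z then x :: z :: zs else z :: pvIns key zs x := by
  unfold pvIns
  rw [PySem.List.insertBy]
  split <;> simp_all

theorem pvIns_ne_nil (key : String → Int) (acc : List String) (x : String) :
    pvIns key acc x ≠ [] := by
  cases acc with
  | nil => simp [pvIns, PySem.List.insertBy]
  | cons z zs => rw [pvIns_cons]; split <;> simp

theorem pvGetLastD_cons_ne_nil {l : List String} (z : String) (h : l ≠ []) :
    (z :: l).getLastD "" = l.getLastD "" := by
  cases l with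
  | nil => exact absurd rfl h
  | cons a t => rfl

theorem pvGetLastD_mem {l : List String} (h : l ≠ []) : l.getLastD "" ∈ l := by
  rw [List.getLastD_eq_getLast?, List.getLast?_eq_some_getLast h]
  exact List.getLast_mem h

-- last of a stable ascending insertion: the new element wins exactly when key(last) ≤ key x
theorem pvInsert_last (key : String → Int) (x : String) :
    ∀ (ys : List String), ys ≠ [] →
    ys.Pairwise (fun a b => key a ≤ key b) →
    (pvIns key ys x).getLastD "" =
      if key (ys.getLastD "") ≤ key x then x else ys.getLastD "" := by
  intro ys
  induction ys with
  | nil => intro h; exact absurd rfl h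
  | cons z zs ih =>
    intro _ hp
    cases zs with
    | nil =>
      rw [pvIns_cons]
      by_cases h : key x < key z
      · rw [if_pos h, if_neg (by simpa using not_le.mpr h)]; rfl
      · rw [if_neg h, if_pos (by simpa using not_lt.mp h)]
        simp [pvIns, PySem.List.insertBy]
    | cons w ws =>
      have hp' : (w :: ws).Pairwise (fun a b => key a ≤ key b) := hp.tail
      have hz : ∀ y ∈ w :: ws, key z ≤ key y := (List.pairwise_cons.mp hp).1
      have hzl : key z ≤ key ((w :: ws).getLastD "") := hz _ (pvGetLastD_mem (by simp))
      rw [pvIns_cons]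
      rw [pvGetLastD_cons_ne_nil z (l := w :: ws) (by simp)]
      by_cases h : key x < key z
      · rw [if_pos h]
        rw [pvGetLastD_cons_ne_nil x (by simp), pvGetLastD_cons_ne_nil z (by simp)]
        rw [if_neg (by omega)]
      · rw [if_neg h]
        rw [pvGetLastD_cons_ne_nil z (pvIns_ne_nil key (w :: ws) x)]
        exact ih (by simp) hp'

-- sorted of a snoc is one more insertion
theorem pvSorted_snoc (key : String → Int) (p : List String) (x : String) :
    PySem.List.sorted (p ++ [x]) key false =
      pvIns key (PySem.List.sorted p key false) x := by
  rw [PySem.List.sorted_eq_foldl_insertBy, PySem.List.sorted_eq_foldl_insertBy,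
    List.foldl_append]
  rfl

-- B's loop is a plain fold once the carried score equals the score of best
theorem pvBestLoop_eq_foldl (sw : List String) :
    ∀ (xs : List String) (best : String),
    pvBestLoop sw best (pvScoreB sw best) xs =
      xs.foldl (fun b x => if pvScoreB sw b ≤ pvScoreB sw x then x else b) best := by
  intro xs
  induction xs with
  | nil => intro best; rfl
  | cons x rest ih =>
    intro best
    simp only [pvBestLoop, List.foldl_cons]
    by_cases h : pvScoreB sw best ≤ pvScoreB sw x
    · rw [if_pos h, if_pos h, ih]
    · rw [if_neg h, if_neg h, ih]

-- main invariant: last of A's insertion fold = B's running-best fold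
theorem pvFold_last (key : String → Int) :
    ∀ (xs p : List String), p ≠ [] →
    (xs.foldl (pvIns key) (PySem.List.sorted p key false)).getLastD "" =
      xs.foldl (fun b x => if key b ≤ key x then x else b)
        ((PySem.List.sorted p key false).getLastD "") := by
  intro xs
  induction xs with
  | nil => intro p _; rfl
  | cons x rest ih =>
    intro p hp
    have hne : PySem.List.sorted p key false ≠ [] := by
      intro h; exact hp ((PySem.List.sorted_eq_nil_iff p key false).mp h)
    have hpair := PySem.List.sorted_pairwise p key
    simp only [List.foldl_cons]
    rw [← pvSorted_snoc key p x]
    rw [ih (p ++ [x]) (by simp), pvSorted_snoc key p x, pvInsert_last key x _ hne hpair]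

-- pyGet? (-1) of a nonempty list is its last element
theorem pvPyGet_neg_one (l : List String) (h : l ≠ []) :
    ((PySem.List.pyGet? l (-1)).getD "") = l.getLastD "" := by
  have hl : 0 < l.length := List.length_pos_iff.mpr h
  simp only [PySem.List.pyGet?, PySem.List.pyIdx?]
  rw [if_neg (by omega), if_pos (by omega)]
  have he : l.length - ((1 : Int)).toNat = l.length - 1 := rfl
  rw [List.getLastD_eq_getLast?, List.getLast?_eq_getElem?]
  cases hg : l[l.length - 1]? with
  | none => rw [List.getElem?_eq_none_iff] at hg; omega
  | some v => simp [hg]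

-- ===== VERDICT (by name: the statement is the Claim_ definition above) =====
theorem select_best_answer_spec : Claim_equal_select_best_answer := by
  intro answers important_strings _ hpre
  unfold Spec_select_best_answer select_best_answer
  cases answers with
  | nil => exact absurd rfl hpre
  | cons x rest =>
    have hB : select_best_answer_alt (x :: rest) important_strings =
        pvBestLoop (pvSpecialWords important_strings) x
          (pvScoreB (pvSpecialWords important_strings) x) rest := rfl
    rw [hB]
    have hkey : pvKeyA (pvSpecialWords important_strings) = pvScoreB (pvSpecialWords important_strings) := rfl
    set key := pvKeyA (pvSpecialWords important_strings) with hk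
    have hsort_ne : PySem.List.sorted (x :: rest) key false ≠ [] := by
      intro h; exact absurd ((PySem.List.sorted_eq_nil_iff _ key false).mp h) (by simp)
    rw [pvPyGet_neg_one _ hsort_ne]
    have hsingle : PySem.List.sorted [x] key false = [x] := by
      rw [PySem.List.sorted_eq_foldl_insertBy]; rfl
    have e1 : PySem.List.sorted (x :: rest) key false =
        List.foldl (pvIns key) (PySem.List.sorted [x] key false) rest := by
      rw [PySem.List.sorted_eq_foldl_insertBy, hsingle]
      rfl
    rw [e1, pvFold_last key rest [x] (by simp), hsingle]
    rw [pvBestLoop_eq_foldl, ← hkey]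
    rfl
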